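-- pv_equiv track=rewrite | github.com/abensonca/galacticus | python/build/fortran_utils.py | _find_comment_position
-- ===== SOURCE A (Python) =====
-- def _find_comment_position(line):
--     """Scan through line character by character to find the comment start position."""
--     i = 0
--     n = len(line)
--     while i < n:
--         c = line[i]
--         if c == '!':
--             # Check it's not an OpenMP sentinel '!$'
--             if i + 1 < n and line[i + 1] == '$':
--                 i += 2
--                 continue
--             return i
--         elif c == '{':
--             # Braces can be nested — skip to matching '}'
--             depth = 0
--             while i < n:
--                 if line[i] == '{':
--                     depth += 1
--                 elif line[i] == '}':
--                     depth -= 1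
--                     if depth == 0:
--                         i += 1
--                         break
--                 i += 1
--         elif c in ('"', "'"):
--             # Skip quoted string
--             quote = c
--             i += 1
--             while i < n:
--                 if line[i] == quote:
--                     if i + 1 < n and line[i + 1] == quote:
--                         i += 2  # escaped quote
--                         continue
--                     i += 1
--                     break
--                 i += 1
--         else:
--             i += 1
--     return -1
-- ===== SOURCE B (Python) =====
-- def _find_comment_position(line):
--     """Scan through line character by character to find the comment start position."""
--     n = len(line)
--     i = 0
--     brace_depth = 0
--     quote = None
--     while i < n:
--         c = line[i]
--         if brace_depth > 0:
--             if c == '{':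
--                 brace_depth += 1
--             elif c == '}':
--                 brace_depth -= 1
--             i += 1
--         elif quote is not None:
--             if c == quote:
--                 if i + 1 < n and line[i + 1] == quote:
--                     i += 2
--                     continue
--                 quote = None
--             i += 1
--         else:
--             if c == '!':
--                 if i + 1 < n and line[i + 1] == '$':
--                     i += 2
--                     continue
--                 return i
--             if c == '{':
--                 brace_depth = 1
--             elif c in ('"', "'"):
--                 quote = c
--             i += 1
--     return -1
-- ===== Notes on version B (the rewrite author's own statement) =====
-- stated objective: alternative
-- what changed: A's two nested inner skip-loops (brace matcher, quoted-string skipper) are replaced by a single flat scanning loop that carries explicit state: an integer brace depth and the current quote character; each iteration dispatches on that state.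
import Mathlib
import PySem

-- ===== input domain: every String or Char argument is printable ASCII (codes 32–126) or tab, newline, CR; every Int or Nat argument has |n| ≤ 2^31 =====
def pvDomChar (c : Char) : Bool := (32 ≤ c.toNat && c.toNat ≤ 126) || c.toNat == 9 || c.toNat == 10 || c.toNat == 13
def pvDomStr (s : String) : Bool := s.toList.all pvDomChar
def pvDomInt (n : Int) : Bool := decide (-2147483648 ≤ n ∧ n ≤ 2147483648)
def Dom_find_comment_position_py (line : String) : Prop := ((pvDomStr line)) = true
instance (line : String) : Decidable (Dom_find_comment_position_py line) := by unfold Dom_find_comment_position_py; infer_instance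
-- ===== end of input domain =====

-- B replaces A's two nested skip-loops by one flat state-machine loop (explicit brace depth +
-- in-string quote state); objective: alternative decomposition, same cost.

-- ===== PORT A =====
-- A's inner brace-skipping loop.  Called with the portion of the line starting ONE PAST the
-- opening '{' and depth already incremented to 1 (the first iteration of Python's inner loop,
-- which re-reads that '{' and sets depth to 1, is unrolled so the recursion is on the list).
-- Returns the remaining characters and the updated index i.
def pvSkipBrace : List Char → Nat → Int → (List Char × Nat)
  | [], i, _ => ([], i)
  | c :: cs, i, depth =>
    if c = '{' then pvSkipBrace cs (i + 1) (depth + 1)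
    else if c = '}' then
      if depth - 1 = 0 then (cs, i + 1) else pvSkipBrace cs (i + 1) (depth - 1)
    else pvSkipBrace cs (i + 1) depth

-- A's inner quoted-string-skipping loop, called one past the opening quote.
def pvSkipString : Char → List Char → Nat → (List Char × Nat)
  | _, [], i => ([], i)
  | q, c :: cs, i =>
    if c = q then
      match cs with
      | d :: cs' => if d = q then pvSkipString q cs' (i + 2) else (cs, i + 1)
      | [] => (cs, i + 1)
    else pvSkipString q cs (i + 1)

theorem pvSkipBrace_len : ∀ (cs : List Char) (i : Nat) (d : Int),
    (pvSkipBrace cs i d).1.length ≤ cs.length := by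
  intro cs
  induction cs with
  | nil => intro i d; simp [pvSkipBrace]
  | cons c cs ih =>
    intro i d
    simp only [pvSkipBrace]
    split_ifs
    all_goals first
      | exact Nat.le_succ_of_le (ih _ _)
      | simp

-- Unfolding equations for pvSkipString (its compiled equations do not fire by name under simp).
theorem pvSkipString_nil (q : Char) (i : Nat) : pvSkipString q [] i = ([], i) := by
  rw [pvSkipString.eq_def]

theorem pvSkipString_cons_ne (q c : Char) (cs : List Char) (i : Nat) (h : ¬ c = q) :
    pvSkipString q (c :: cs) i = pvSkipString q cs (i + 1) := by
  rw [pvSkipString.eq_def]; simp [h]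

theorem pvSkipString_one (q : Char) (i : Nat) : pvSkipString q [q] i = ([], i + 1) := by
  rw [pvSkipString.eq_def]; simp

theorem pvSkipString_esc (q : Char) (cs' : List Char) (i : Nat) :
    pvSkipString q (q :: q :: cs') i = pvSkipString q cs' (i + 2) := by
  rw [pvSkipString.eq_def]; simp

theorem pvSkipString_close (q d : Char) (cs' : List Char) (i : Nat) (h : ¬ d = q) :
    pvSkipString q (q :: d :: cs') i = (d :: cs', i + 1) := by
  rw [pvSkipString.eq_def]; simp [h]

theorem pvSkipString_len_aux : ∀ (n : Nat) (cs : List Char), cs.length ≤ n → ∀ (q : Char) (i : Nat),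
    (pvSkipString q cs i).1.length ≤ cs.length := by
  intro n
  induction n with
  | zero =>
    intro cs h q i
    match cs with
    | [] => simp [pvSkipString_nil]
    | _ :: _ => simp at h
  | succ n ih =>
    intro cs h q i
    match cs with
    | [] => simp [pvSkipString_nil]
    | c :: cs =>
      by_cases h1 : c = q
      · subst h1
        match cs with
        | [] => simp [pvSkipString_one]
        | d :: cs' =>
          by_cases h2 : d = c
          · subst h2
            have := ih cs' (by simp at h; omega) d (i + 2)
            rw [pvSkipString_esc]
            simp only [List.length_cons]; omega
          · rw [pvSkipString_close c d cs' i h2]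
            simp
      · have := ih cs (by simp at h; omega) q (i + 1)
        rw [pvSkipString_cons_ne q c cs i h1]
        simp only [List.length_cons]; omega

theorem pvSkipString_len (cs : List Char) (q : Char) (i : Nat) :
    (pvSkipString q cs i).1.length ≤ cs.length :=
  pvSkipString_len_aux cs.length cs le_rfl q i

-- A's outer loop; faithful to the Python: '!' checks the '!$' sentinel, '{' hands over to the
-- brace skipper, a quote to the string skipper, anything else advances.
def pvLoopA : List Char → Nat → Int
  | [], _ => -1
  | c :: cs, i =>
    if c = '!' then
      match cs with
      | d :: cs' => if d = '$' then pvLoopA cs' (i + 2) else (i : Int)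
      | [] => (i : Int)
    else if c = '{' then
      let r := pvSkipBrace cs (i + 1) 1
      pvLoopA r.1 r.2
    else if c = '"' ∨ c = '\'' then
      let r := pvSkipString c cs (i + 1)
      pvLoopA r.1 r.2
    else pvLoopA cs (i + 1)
  termination_by cs _ => cs.length
  decreasing_by
  · simp only [List.length_cons]; omega
  · have := pvSkipBrace_len cs (i + 1) 1; simp only [List.length_cons]; omega
  · have := pvSkipString_len cs c (i + 1); simp only [List.length_cons]; omega
  · simp only [List.length_cons]; omega

def find_comment_position_py (line : String) : Int := pvLoopA line.toList 0

-- ===== PORT B =====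
-- B's single flat loop: bd = brace depth, q = the quote character while inside a string;
-- the 'i+1 < n and line[i+1] == …' look-aheads are ported as cs.head? = some _ with recursion on cs.tail.
def pvLoopB : List Char → Nat → Int → Option Char → Int
  | [], _, _, _ => -1
  | c :: cs, i, bd, q =>
    if bd > 0 then
      if c = '{' then pvLoopB cs (i + 1) (bd + 1) q
      else if c = '}' then pvLoopB cs (i + 1) (bd - 1) q
      else pvLoopB cs (i + 1) bd q
    else
      match q with
      | some qc =>
        if c = qc then
          if cs.head? = some qc then pvLoopB cs.tail (i + 2) bd q
          else pvLoopB cs (i + 1) bd none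
        else pvLoopB cs (i + 1) bd q
      | none =>
        if c = '!' then
          (if cs.head? = some '$' then pvLoopB cs.tail (i + 2) bd q else (i : Int))
        else if c = '{' then pvLoopB cs (i + 1) 1 q
        else if c = '"' ∨ c = '\'' then pvLoopB cs (i + 1) bd (some c)
        else pvLoopB cs (i + 1) bd q
  termination_by cs _ _ _ => cs.length
  decreasing_by all_goals simp [List.length_tail]

def find_comment_position_py_alt (line : String) : Int := pvLoopB line.toList 0 0 none

-- ===== PRECONDITION & SPEC =====
def Spec_find_comment_position_py (line : String) (out : Int) : Prop := out = find_comment_position_py_alt line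
instance (line : String) (out : Int) : Decidable (Spec_find_comment_position_py line out) := by unfold Spec_find_comment_position_py; infer_instance

-- ===== CLAIM (what is proved, stated in full; the proofs are below) =====
def Claim_equal_find_comment_position_py : Prop := ∀ (line : String), Dom_find_comment_position_py line → Spec_find_comment_position_py line (find_comment_position_py line)

-- ===== LEMMAS AND PROOFS =====

-- In brace mode (bd ≥ 1), B's flat loop computes exactly what A's brace skipper leaves behind.
theorem pvLoopB_brace : ∀ (n : Nat) (cs : List Char), cs.length ≤ n → ∀ (i : Nat) (d : Int), 1 ≤ d →
    pvLoopB cs i d none = pvLoopB (pvSkipBrace cs i d).1 (pvSkipBrace cs i d).2 0 none := by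
  intro n
  induction n with
  | zero =>
    intro cs h i d hd
    match cs with
    | [] => simp [pvSkipBrace, pvLoopB]
    | _ :: _ => simp at h
  | succ n ih =>
    intro cs h i d hd
    match cs with
    | [] => simp [pvSkipBrace, pvLoopB]
    | c :: cs =>
      have hlen : cs.length ≤ n := by simp at h; omega
      have hd' : d > 0 := by omega
      conv_lhs => rw [pvLoopB]
      simp only [if_pos hd', pvSkipBrace]
      by_cases h1 : c = '{'
      · simp only [if_pos h1]
        exact ih cs hlen (i + 1) (d + 1) (by omega)
      · by_cases h2 : c = '}'
        · simp only [if_neg h1, if_pos h2]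
          by_cases h3 : d - 1 = 0
          · simp [h3]
          · simp only [if_neg h3]
            exact ih cs hlen (i + 1) (d - 1) (by omega)
        · simp only [if_neg h1, if_neg h2]
          exact ih cs hlen (i + 1) d hd

-- In string mode, B's flat loop computes exactly what A's string skipper leaves behind.
theorem pvLoopB_string : ∀ (n : Nat) (cs : List Char), cs.length ≤ n → ∀ (i : Nat) (qc : Char),
    pvLoopB cs i 0 (some qc) = pvLoopB (pvSkipString qc cs i).1 (pvSkipString qc cs i).2 0 none := by
  intro n
  induction n with
  | zero =>
    intro cs h i qc
    match cs with
    | [] => simp [pvSkipString_nil, pvLoopB]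
    | _ :: _ => simp at h
  | succ n ih =>
    intro cs h i qc
    match cs with
    | [] => simp [pvSkipString_nil, pvLoopB]
    | c :: cs =>
      conv_lhs => rw [pvLoopB]
      simp only [gt_iff_lt, lt_self_iff_false, if_false]
      by_cases h1 : c = qc
      · subst h1
        match cs with
        | [] => simp [pvSkipString_one, pvLoopB]
        | d :: cs' =>
          by_cases h2 : d = c
          · subst h2
            simp only [List.head?_cons, List.tail_cons, pvSkipString_esc]
            exact ih cs' (by simp at h; omega) (i + 2) _
          · have hne : ¬ ((some d : Option Char) = some c) := by simp [h2]
            simp only [List.head?_cons, if_neg hne, if_true, pvSkipString_close c d cs' i h2]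
      · simp only [if_neg h1, pvSkipString_cons_ne qc c cs i h1]
        exact ih cs (by simp at h; omega) (i + 1) qc

theorem pvLoop_eq : ∀ (n : Nat) (cs : List Char), cs.length ≤ n → ∀ (i : Nat),
    pvLoopA cs i = pvLoopB cs i 0 none := by
  intro n
  induction n with
  | zero =>
    intro cs h i
    match cs with
    | [] => simp [pvLoopA, pvLoopB]
    | _ :: _ => simp at h
  | succ n ih =>
    intro cs h i
    match cs with
    | [] => simp [pvLoopA, pvLoopB]
    | c :: cs =>
      have hlen : cs.length ≤ n := by simp at h; omega
      conv_lhs => rw [pvLoopA.eq_def]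
      conv_rhs => rw [pvLoopB]
      simp only [gt_iff_lt, lt_self_iff_false, if_false]
      by_cases h1 : c = '!'
      · simp only [if_pos h1]
        match cs with
        | [] => simp
        | d :: cs' =>
          by_cases h2 : d = '$'
          · subst h2
            simp only [List.head?_cons, List.tail_cons]
            exact ih cs' (by simp at hlen; omega) (i + 2)
          · have hne : ¬ ((d :: cs').head? = some '$') := by simp [h2]
            simp only [if_neg h2, if_neg hne]
      · by_cases h2 : c = '{'
        · simp only [if_neg h1, if_pos h2]
          rw [pvLoopB_brace cs.length cs le_rfl (i + 1) 1 le_rfl]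
          exact ih _ (le_trans (pvSkipBrace_len cs (i + 1) 1) hlen) _
        · by_cases h3 : c = '"' ∨ c = '\''
          · simp only [if_neg h1, if_neg h2, if_pos h3]
            rw [pvLoopB_string cs.length cs le_rfl (i + 1) c]
            exact ih _ (le_trans (pvSkipString_len cs c (i + 1)) hlen) _
          · simp only [if_neg h1, if_neg h2, if_neg h3]
            exact ih cs hlen (i + 1)

-- ===== VERDICT (by name: the statement is the Claim_ definition above) =====
theorem find_comment_position_py_spec : Claim_equal_find_comment_position_py := by
  intro line _
  unfold Spec_find_comment_position_py find_comment_position_py find_comment_position_py_alt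
  exact pvLoop_eq line.toList.length line.toList le_rfl 0
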